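-- pv_equiv track=rewrite | github.com/Gadjib/ocamlhomeworks | 2021-summer/Codeforces/1513c.py | apply_funcs
-- ===== SOURCE A (Python) =====
-- def parse_to_list(n):
--     ll=list(str(n))
--     l=list(map(int, ll))
--     return(l)
--
-- def parse_elements(l):
--     lans=[]
--     for i in range(len(l)):
--         lans=lans+(parse_to_list(l[i]))
--     return(lans)
--
-- def apply_funcs(n, m):
--     l=parse_to_list(n)
--     for i in range(m):
--         l=list(map(lambda x: x+1, l))
--         l=parse_elements(l)
--     l1=list(map(str,l))
--     s="".join(l1)
--     return(len(s))
-- ===== SOURCE B (Python) =====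
-- def apply_funcs(n, m):
--     # DP: f[d] = number of digits that a single digit d becomes after the
--     # remaining increment-and-split steps; iterate the recurrence m times,
--     # then sum over the digits of n.
--     f = [1] * 10
--     for _ in range(m):
--         f = f[1:] + [f[1] + f[0]]
--     return sum(f[int(c)] for c in str(n))
-- ===== Notes on version B (the rewrite author's own statement) =====
-- stated objective: faster
-- what changed: Replaces the exponential simulation that materialises the whole digit list each step with a 10-entry DP vector f[d] = digit count produced by digit d after the remaining steps, iterated m times and summed over the digits of n; intended as faster (measured 398x at the largest size where A still finished; A times out beyond).
import Mathlib
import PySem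

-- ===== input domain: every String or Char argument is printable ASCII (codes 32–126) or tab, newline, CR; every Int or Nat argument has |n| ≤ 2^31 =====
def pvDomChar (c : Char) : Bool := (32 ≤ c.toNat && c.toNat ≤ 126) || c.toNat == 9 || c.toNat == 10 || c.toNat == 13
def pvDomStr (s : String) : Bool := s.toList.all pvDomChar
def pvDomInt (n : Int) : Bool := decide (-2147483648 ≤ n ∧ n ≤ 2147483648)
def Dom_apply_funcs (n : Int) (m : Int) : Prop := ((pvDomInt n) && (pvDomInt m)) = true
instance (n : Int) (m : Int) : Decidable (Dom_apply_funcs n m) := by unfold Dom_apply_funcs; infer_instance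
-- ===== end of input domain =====

-- B replaces A's exponential digit-list simulation with a 10-entry DP vector iterated m times (intended as faster; a timing run read 398x at the largest size A finished, A times out beyond).


-- ===== PORT A =====
-- parse_to_list(n): list(map(int, list(str(n)))); int(c) on a one-char string is
-- PySem.Int.ofChars? [c] (none = Python's ValueError; only reached outside Pre_, where .getD 0 is arbitrary).
def pvParseToList (x : Int) : List Int :=
  (PySem.Int.toChars x).map (fun c => (PySem.Int.ofChars? [c]).getD 0)

-- parse_elements(l): for i in range(len(l)): lans = lans + parse_to_list(l[i])
def pvParseElements (l : List Int) : List Int :=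
  (List.range l.length).foldl (fun lans (i : Nat) => lans ++ pvParseToList (PySem.List.pyGetD l (i : Int) 0)) []

def apply_funcs (n : Int) (m : Int) : Int :=
  let l0 := pvParseToList n
  let l := (List.range m.toNat).foldl (fun l _ => pvParseElements (l.map (· + 1))) l0
  -- l1 = list(map(str, l)); s = "".join(l1); return len(s)
  ((PySem.Chars.join [] (l.map PySem.Int.toChars)).length : Int)

-- ===== PORT B =====
-- f = [1]*10; for _ in range(m): f = f[1:] + [f[1] + f[0]]; return sum(f[int(c)] for c in str(n))
-- f[1:] is List.drop 1 (exact for this nonneg literal slice); f[i] is pyGetD (index always in range here).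
def apply_funcs_alt (n : Int) (m : Int) : Int :=
  let f := (List.range m.toNat).foldl
    (fun (f : List Int) _ => f.drop 1 ++ [PySem.List.pyGetD f 1 0 + PySem.List.pyGetD f 0 0])
    (List.replicate 10 1)
  ((PySem.Int.toChars n).map
    (fun c => PySem.List.pyGetD f ((PySem.Int.ofChars? [c]).getD 0) 0)).sum

-- ===== PRECONDITION & SPEC =====
-- A raises ValueError for n < 0: str(n) starts with '-' and int('-') fails. (B raises there too.)
def Pre_apply_funcs (n : Int) (_m : Int) : Prop := 0 ≤ n
instance (n : Int) (m : Int) : Decidable (Pre_apply_funcs n m) := by unfold Pre_apply_funcs; infer_instance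
def pvWitness_apply_funcs : Int × Int := (109, 3)

def Spec_apply_funcs (n : Int) (m : Int) (out : Int) : Prop := out = apply_funcs_alt n m
instance (n : Int) (m : Int) (out : Int) : Decidable (Spec_apply_funcs n m out) := by unfold Spec_apply_funcs; infer_instance

-- ===== CLAIM (what is proved, stated in full; the proofs are below) =====
def Claim_equal_apply_funcs : Prop := ∀ (n : Int) (m : Int), Dom_apply_funcs n m → Pre_apply_funcs n m → Spec_apply_funcs n m (apply_funcs n m)

-- ===== LEMMAS AND PROOFS =====

-- A's loop body, as one function
def pvStepA (l : List Int) : List Int := pvParseElements (l.map (· + 1))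
-- number of digits that the single digit d becomes after k steps of A's loop
def pvL (d : Int) (k : Nat) : Int := ((pvStepA^[k]) [d]).length
def pvDigit (d : Int) : Prop := 0 ≤ d ∧ d ≤ 9
-- B's loop body, as one function
def pvStepB (f : List Int) : List Int :=
  f.drop 1 ++ [PySem.List.pyGetD f 1 0 + PySem.List.pyGetD f 0 0]

lemma pe_flatMap (l : List Int) : pvParseElements l = l.flatMap pvParseToList := by
  unfold pvParseElements
  have hmap : (List.range l.length).map (fun (i : Nat) => PySem.List.pyGetD l (i : Int) 0) = l := by
    apply List.ext_getElem (by simp)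
    intro i h1 h2
    simp only [List.getElem_map, List.getElem_range, PySem.List.pyGetD_natCast]
    simp [List.getD_eq_getElem?_getD, List.getElem?_eq_getElem h2]
  rw [PySem.List.foldl_append_eq_flatMap, List.nil_append, List.flatMap_def, List.flatMap_def]
  conv_rhs => rw [← hmap, List.map_map]
  rfl

lemma stepA_append (a b : List Int) : pvStepA (a ++ b) = pvStepA a ++ pvStepA b := by
  simp [pvStepA, pe_flatMap]

lemma stepA_singletons (l : List Int) : pvStepA l = l.flatMap (fun d => pvStepA [d]) := by
  induction l with
  | nil => simp [pvStepA, pe_flatMap]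
  | cons d rest ih =>
      have : d :: rest = [d] ++ rest := rfl
      rw [this, stepA_append, ih]; simp

lemma iter_append (k : Nat) (a b : List Int) :
    (pvStepA^[k]) (a ++ b) = (pvStepA^[k]) a ++ (pvStepA^[k]) b := by
  induction k generalizing a b with
  | zero => simp
  | succ k ih => simp [Function.iterate_succ_apply, stepA_append, ih]

lemma iter_nil (k : Nat) : (pvStepA^[k]) ([] : List Int) = [] := by
  induction k with
  | zero => simp
  | succ k ih => simp [Function.iterate_succ_apply, pvStepA, pe_flatMap, ih]

lemma len_iter (l : List Int) (k : Nat) :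
    (((pvStepA^[k]) l).length : Int) = (l.map (fun d => pvL d k)).sum := by
  induction l with
  | nil => simp [iter_nil]
  | cons d rest ih =>
      have : d :: rest = [d] ++ rest := rfl
      rw [this, iter_append]
      simp only [List.length_append, List.map_append, List.sum_append]
      push_cast
      rw [ih]
      simp [pvL]

lemma stepA_digit (d : Int) (h0 : 0 ≤ d) (h9 : d ≤ 9) :
    pvStepA [d] = if d ≤ 8 then [d + 1] else [1, 0] := by
  interval_cases d <;> decide

lemma digit_stepA (l : List Int) (h : ∀ x ∈ l, pvDigit x) : ∀ x ∈ pvStepA l, pvDigit x := by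
  intro x hx
  rw [stepA_singletons] at hx
  simp only [List.mem_flatMap] at hx
  obtain ⟨d, hd, hx⟩ := hx
  obtain ⟨h0, h9⟩ := h d hd
  rw [stepA_digit d h0 h9] at hx
  by_cases h8 : d ≤ 8
  · rw [if_pos h8] at hx
    simp only [List.mem_singleton] at hx
    exact ⟨by omega, by omega⟩
  · rw [if_neg h8] at hx
    simp only [List.mem_cons, List.not_mem_nil, or_false] at hx
    rcases hx with rfl | rfl <;> exact ⟨by omega, by omega⟩

lemma L_succ_lt (d : Int) (h0 : 0 ≤ d) (h8 : d ≤ 8) (k : Nat) :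
    pvL d (k + 1) = pvL (d + 1) k := by
  unfold pvL
  rw [Function.iterate_succ_apply, stepA_digit d h0 (by omega), if_pos h8]

lemma L_succ_9 (k : Nat) : pvL 9 (k + 1) = pvL 1 k + pvL 0 k := by
  unfold pvL
  rw [Function.iterate_succ_apply, stepA_digit 9 (by omega) (by omega)]
  simp only [if_neg (by omega : ¬(9:Int) ≤ 8)]
  have : ([1, 0] : List Int) = [1] ++ [0] := rfl
  rw [this, iter_append]
  push_cast [List.length_append]
  ring

lemma iter_digits (k : Nat) (l : List Int) (h : ∀ x ∈ l, pvDigit x) :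
    ∀ x ∈ (pvStepA^[k]) l, pvDigit x := by
  induction k generalizing l with
  | zero => simpa using h
  | succ k ih =>
      rw [Function.iterate_succ_apply]
      exact ih _ (digit_stepA l h)

lemma mem_toDigitsCore (fuel : Nat) : ∀ (n : Nat) (acc : List Char),
    ∀ c ∈ Nat.toDigitsCore 10 fuel n acc, c ∈ acc ∨ ∃ d, d < 10 ∧ c = Nat.digitChar d := by
  induction fuel with
  | zero => intro n acc c hc; exact Or.inl hc
  | succ fuel ih =>
      intro n acc c hc
      rw [Nat.toDigitsCore] at hc
      by_cases h : n / 10 = 0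
      · simp only [h, if_true] at hc
        rw [List.mem_cons] at hc
        rcases hc with rfl | hc
        · exact Or.inr ⟨n % 10, Nat.mod_lt _ (by omega), rfl⟩
        · exact Or.inl hc
      · simp only [if_neg h] at hc
        rcases ih (n / 10) (Nat.digitChar (n % 10) :: acc) c hc with hm | hm
        · rw [List.mem_cons] at hm
          rcases hm with rfl | hm
          · exact Or.inr ⟨n % 10, Nat.mod_lt _ (by omega), rfl⟩
          · exact Or.inl hm
        · exact Or.inr hm

lemma digitChar_val (d : Nat) (hd : d < 10) :
    pvDigit ((PySem.Int.ofChars? [Nat.digitChar d]).getD 0) := by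
  unfold pvDigit
  interval_cases d <;> exact ⟨by decide, by decide⟩

lemma parseToList_digits (n : Int) (hn : 0 ≤ n) : ∀ x ∈ pvParseToList n, pvDigit x := by
  intro x hx
  unfold pvParseToList at hx
  rw [List.mem_map] at hx
  obtain ⟨c, hc, rfl⟩ := hx
  rw [PySem.Int.toChars, if_neg (by omega)] at hc
  rcases mem_toDigitsCore _ _ _ c hc with h | ⟨d, hd, rfl⟩
  · simp at h
  · exact digitChar_val d hd

lemma toChars_digit_len (d : Int) (h : pvDigit d) : (PySem.Int.toChars d).length = 1 := by
  obtain ⟨h0, h9⟩ := h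
  interval_cases d <;> decide

lemma join_nil_flatten (parts : List (List Char)) : PySem.Chars.join [] parts = parts.flatten := by
  induction parts with
  | nil => simp [PySem.Chars.join, List.intercalate]
  | cons p ps ih =>
    cases ps with
    | nil => simp [PySem.Chars.join, List.intercalate]
    | cons q qs => simp_all [PySem.Chars.join, List.intercalate, List.intersperse]

lemma len_join (l : List Int) (h : ∀ x ∈ l, pvDigit x) :
    (PySem.Chars.join [] (l.map PySem.Int.toChars)).length = l.length := by
  induction l with
  | nil => simp
  | cons d rest ih =>
      rw [join_nil_flatten] at ih ⊢
      simp only [List.map_cons, List.flatten_cons, List.length_append]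
      rw [toChars_digit_len d (h d (by simp)), ih (fun x hx => h x (by simp [hx]))]
      simp [Nat.add_comm]

lemma foldl_iterate {α : Type} (f : α → α) (x : α) (k : Nat) :
    List.foldl (fun y _ => f y) x (List.range k) = f^[k] x := by
  induction k with
  | zero => simp
  | succ k ih => rw [List.range_succ, List.foldl_append, ih]; simp [Function.iterate_succ_apply']

lemma stepB_len (g : List Int) (h : g.length = 10) : (pvStepB g).length = 10 := by
  simp [pvStepB, h]

lemma stepB_getD_lt (g : List Int) (h : g.length = 10) (d : Nat) (hd : d < 9) :
    (pvStepB g).getD d 0 = g.getD (d + 1) 0 := by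
  unfold pvStepB
  rw [List.getD_append _ _ _ _ (by simp [h]; omega)]
  simp [List.getD]

lemma stepB_getD_9 (g : List Int) (h : g.length = 10) :
    (pvStepB g).getD 9 0 = g.getD 1 0 + g.getD 0 0 := by
  unfold pvStepB
  rw [List.getD_eq_getElem?_getD, List.getElem?_append_right (by simp [h])]
  rw [PySem.List.pyGetD_ofNat', PySem.List.pyGetD_ofNat']
  simp [h]

-- B's DP vector after k iterations holds exactly the per-digit counts pvL · k
lemma gB_spec (k : Nat) :
    ((pvStepB^[k]) (List.replicate 10 1)).length = 10 ∧
    ∀ d : Nat, d < 10 → ((pvStepB^[k]) (List.replicate 10 1)).getD d 0 = pvL (d : Int) k := by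
  induction k with
  | zero =>
      refine ⟨by simp, fun d hd => ?_⟩
      rw [Function.iterate_zero_apply, List.getD_eq_getElem?_getD,
        List.getElem?_replicate, if_pos hd]
      simp [pvL]
  | succ k ih =>
      obtain ⟨hlen, hval⟩ := ih
      rw [Function.iterate_succ_apply']
      refine ⟨stepB_len _ hlen, fun d hd => ?_⟩
      by_cases h9 : d < 9
      · rw [stepB_getD_lt _ hlen d h9, hval (d + 1) (by omega)]
        push_cast
        exact (L_succ_lt (d : Int) (by omega) (by omega) k).symm
      · have hd9 : d = 9 := by omega
        subst hd9
        rw [stepB_getD_9 _ hlen, hval 1 (by omega), hval 0 (by omega)]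
        push_cast
        exact (L_succ_9 k).symm

theorem apply_funcs_eq (n m : Int) (hpre : 0 ≤ n) : apply_funcs n m = apply_funcs_alt n m := by
  unfold apply_funcs apply_funcs_alt
  dsimp only
  have hA : List.foldl (fun (l : List Int) (_ : Nat) => pvParseElements (List.map (fun x => x + 1) l))
      (pvParseToList n) (List.range m.toNat) = (pvStepA^[m.toNat]) (pvParseToList n) :=
    foldl_iterate pvStepA (pvParseToList n) m.toNat
  have hB : List.foldl (fun (f : List Int) (_ : Nat) => List.drop 1 f ++ [PySem.List.pyGetD f 1 0 + PySem.List.pyGetD f 0 0])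
      (List.replicate 10 1) (List.range m.toNat) = (pvStepB^[m.toNat]) (List.replicate 10 1) :=
    foldl_iterate pvStepB (List.replicate 10 1) m.toNat
  rw [hA, hB]
  have hdig0 := parseToList_digits n hpre
  have hdig := iter_digits m.toNat _ hdig0
  rw [len_join _ hdig, len_iter]
  obtain ⟨hflen, hfval⟩ := gB_spec m.toNat
  unfold pvParseToList
  rw [List.map_map]
  congr 1
  apply List.map_congr_left
  intro c hc
  have hdc : pvDigit ((PySem.Int.ofChars? [c]).getD 0) :=
    hdig0 _ (by unfold pvParseToList; exact List.mem_map_of_mem hc)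
  obtain ⟨h0, h9⟩ := hdc
  set d := (PySem.Int.ofChars? [c]).getD 0 with hd
  have hnat : d = ((d.toNat : Nat) : Int) := (Int.toNat_of_nonneg h0).symm
  simp only [Function.comp_apply]
  rw [hnat, PySem.List.pyGetD_natCast, hfval d.toNat (by omega), ← hd]
  exact congrArg (fun x => pvL x m.toNat) hnat

-- ===== VERDICT (by name: the statement is the Claim_ definition above) =====
theorem apply_funcs_spec : Claim_equal_apply_funcs := by
  intro n m _ hpre
  unfold Spec_apply_funcs
  exact apply_funcs_eq n m hpre
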